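-- pv_equiv track=rewrite | github.com/cchoy96/Advent-2022 | day8/code.py | visiblefromleft
-- ===== SOURCE A (Python) =====
-- def visiblefromleft(rowitems,col,height):
--     vis = True
--     score = 0
--     for tree in rowitems[:col]:
--         if tree >= height:
--             vis = False
--             score = 1
--         else:
--             score += 1
--     score = 1 if score == 0 else score
--     return (vis,score)
-- ===== SOURCE B (Python) =====
-- def visiblefromleft(rowitems, col, height):
--     vis = True
--     score = 0
--     for tree in reversed(rowitems[:col]):
--         score += 1
--         if tree >= height:
--             vis = False
--             break
--     return (vis, 1 if score == 0 else score)
-- ===== Notes on version B (the rewrite author's own statement) =====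
-- stated objective: idiomatic
-- what changed: B scans the slice outward from the tree (reversed) with increment-then-test and an early break at the first blocker, instead of A's forward pass that keeps a reset accumulator over the whole slice.
import Mathlib
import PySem

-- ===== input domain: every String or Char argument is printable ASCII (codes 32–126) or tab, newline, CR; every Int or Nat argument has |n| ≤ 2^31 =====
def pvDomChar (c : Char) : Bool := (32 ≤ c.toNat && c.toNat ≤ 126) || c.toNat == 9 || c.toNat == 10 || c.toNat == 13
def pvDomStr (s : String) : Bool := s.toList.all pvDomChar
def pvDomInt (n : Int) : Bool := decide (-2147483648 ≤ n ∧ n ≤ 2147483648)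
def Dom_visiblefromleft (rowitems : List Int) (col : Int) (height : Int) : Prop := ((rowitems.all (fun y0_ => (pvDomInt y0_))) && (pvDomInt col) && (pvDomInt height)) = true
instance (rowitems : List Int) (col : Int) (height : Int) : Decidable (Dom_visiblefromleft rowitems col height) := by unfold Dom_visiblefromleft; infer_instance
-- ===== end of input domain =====

-- B scans the slice outward from the tree (reversed, early break at the first blocker) instead of A's forward reset-accumulator pass; same result, proved equal.


-- ===== PORT A =====
-- forward loop over rowitems[:col]; blocker resets score to 1 and clears vis, otherwise score += 1
def visiblefromleft (rowitems : List Int) (col : Int) (height : Int) : Bool × Int :=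
  let st :=
    (PySem.List.slice rowitems none (some col)).foldl
      (fun (st : Bool × Int) tree =>
        if tree ≥ height then (false, 1) else (st.1, st.2 + 1))
      (true, 0)
  (st.1, if st.2 = 0 then 1 else st.2)

-- ===== PORT B =====
-- backward scan with early break: increment score, stop at the first tree ≥ height
def vflGo (height : Int) : List Int → Int → Bool × Int
  | [], score => (true, score)
  | tree :: rest, score =>
      let score := score + 1
      if tree ≥ height then (false, score) else vflGo height rest score

def visiblefromleft_alt (rowitems : List Int) (col : Int) (height : Int) : Bool × Int :=
  let st := vflGo height (PySem.List.slice rowitems none (some col)).reverse 0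
  (st.1, if st.2 = 0 then 1 else st.2)

-- ===== PRECONDITION & SPEC =====
def Spec_visiblefromleft (rowitems : List Int) (col : Int) (height : Int) (out : Bool × Int) : Prop := out = visiblefromleft_alt rowitems col height
instance (rowitems : List Int) (col : Int) (height : Int) (out : Bool × Int) : Decidable (Spec_visiblefromleft rowitems col height out) := by unfold Spec_visiblefromleft; infer_instance

-- ===== CLAIM (what is proved, stated in full; the proofs are below) =====
def Claim_equal_visiblefromleft : Prop := ∀ (rowitems : List Int) (col : Int) (height : Int), Dom_visiblefromleft rowitems col height → Spec_visiblefromleft rowitems col height (visiblefromleft rowitems col height)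

-- ===== LEMMAS AND PROOFS =====

-- the accumulator of vflGo only shifts the score
theorem vflGo_shift (height : Int) (l : List Int) (acc : Int) :
    vflGo height l acc = ((vflGo height l 0).1, (vflGo height l 0).2 + acc) := by
  induction l generalizing acc with
  | nil => simp [vflGo]
  | cons t rest ih =>
      by_cases h : t ≥ height
      · simp only [vflGo, if_pos h, Prod.mk.injEq]
        exact ⟨trivial, by ring⟩
      · simp only [vflGo, if_neg h]
        rw [ih (0 + 1), ih (acc + 1)]
        simp only [Prod.mk.injEq]
        exact ⟨trivial, by ring⟩

-- B's backward early-exit scan computes A's forward fold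
theorem vflGo_eq_foldl (height : Int) (l : List Int) :
    vflGo height l.reverse 0 =
      l.foldl (fun (st : Bool × Int) tree =>
        if tree ≥ height then (false, 1) else (st.1, st.2 + 1)) (true, 0) := by
  induction l using List.reverseRecOn with
  | nil => simp [vflGo]
  | append_singleton l x ih =>
      rw [List.reverse_append, List.foldl_append]
      simp only [List.reverse_singleton, List.singleton_append, List.foldl_cons, List.foldl_nil]
      by_cases h : x ≥ height
      · simp [vflGo, h]
      · simp only [vflGo, if_neg h]
        rw [vflGo_shift, ih]
        norm_num

-- ===== VERDICT (by name: the statement is the Claim_ definition above) =====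
theorem visiblefromleft_spec : Claim_equal_visiblefromleft := by
  intro rowitems col height _
  unfold Spec_visiblefromleft visiblefromleft visiblefromleft_alt
  rw [vflGo_eq_foldl]
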